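-- pv_equiv track=rewrite | github.com/Inter-Raptor/CavRogue | pc/CavRogue.py | make_player_frames
-- ===== SOURCE A (Python) =====
-- from typing import List, Tuple, Optional, Dict
--
-- def pattern_to_offsets(lines: List[str]) -> List[Tuple[int,int]]:
--     offs: List[Tuple[int,int]] = []
--     for y, row in enumerate(lines):
--         for x, ch in enumerate(row):
--             if ch == "0":
--                 offs.append((x, y))
--     return offs
--
-- FEET = ["0--0", "-0-0", "0-0-", "0--0"]
--
-- def make_player_frames(direction: str) -> List[List[Tuple[int,int]]]:
--     frames: List[List[Tuple[int,int]]] = []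
--     if direction == "L":
--         top = ["-00-","000-","-00-"]
--     elif direction == "R":
--         top = ["-00-","-000","-00-"]
--     elif direction == "U":
--         top = ["--0-","-00-","-00-"]
--     else:
--         top = ["-00-","-00-","-00-"]
--     for feet in FEET:
--         lines = top + [feet]
--         frames.append(pattern_to_offsets(lines))
--     return frames
-- ===== SOURCE B (Python) =====
-- from typing import List, Tuple
--
-- # Precomputed sprite frames: the offsets are fixed data, so look them up
-- # instead of rescanning pattern strings on every call.
-- _TOP_L = [(1,0),(2,0),(0,1),(1,1),(2,1),(1,2),(2,2)]
-- _TOP_R = [(1,0),(2,0),(1,1),(2,1),(3,1),(1,2),(2,2)]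
-- _TOP_U = [(2,0),(1,1),(2,1),(1,2),(2,2)]
-- _TOP_D = [(1,0),(2,0),(1,1),(2,1),(1,2),(2,2)]
-- _FEET_OFFS = [[(0,3),(3,3)], [(1,3),(3,3)], [(0,3),(2,3)], [(0,3),(3,3)]]
--
-- _FRAMES = {d: [top + feet for feet in _FEET_OFFS]
--            for d, top in (("L",_TOP_L),("R",_TOP_R),("U",_TOP_U),("D",_TOP_D))}
--
-- def make_player_frames(direction: str) -> List[List[Tuple[int,int]]]:
--     return [list(f) for f in _FRAMES.get(direction, _FRAMES["D"])]
-- ===== Notes on version B (the rewrite author's own statement) =====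
-- stated objective: alternative
-- what changed: B replaces A's per-call pattern-string scanning entirely with a precomputed lookup table of offset literals (four top-offset lists combined once with four feet-offset lists at module load); make_player_frames is just a dict lookup with the D-table as default.
import Mathlib
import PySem

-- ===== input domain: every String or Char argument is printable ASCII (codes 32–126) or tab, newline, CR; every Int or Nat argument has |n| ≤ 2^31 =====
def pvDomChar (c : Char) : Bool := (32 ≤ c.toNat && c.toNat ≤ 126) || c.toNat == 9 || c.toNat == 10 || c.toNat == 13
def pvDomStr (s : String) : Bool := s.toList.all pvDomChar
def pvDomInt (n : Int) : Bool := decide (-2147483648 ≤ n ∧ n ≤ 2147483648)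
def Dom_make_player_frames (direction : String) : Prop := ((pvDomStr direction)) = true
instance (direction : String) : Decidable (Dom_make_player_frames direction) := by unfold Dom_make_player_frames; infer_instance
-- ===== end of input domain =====

-- B replaces A's per-call pattern scanning with a lookup into a table of precomputed offset literals built once (alternative algorithm: data table vs grid scan).


-- ===== PORT A =====
def pattern_to_offsets (lines : List String) : List (Int × Int) :=
  (PySem.List.enumerate lines).foldl (fun offs yr =>
    (PySem.List.enumerate yr.2.toList).foldl (fun offs xc =>
      if xc.2 = '0' then offs ++ [(xc.1, yr.1)] else offs) offs) []

def pvFEET : List String := ["0--0", "-0-0", "0-0-", "0--0"]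

def make_player_frames (direction : String) : List (List (Int × Int)) :=
  let top : List String :=
    if direction = "L" then ["-00-","000-","-00-"]
    else if direction = "R" then ["-00-","-000","-00-"]
    else if direction = "U" then ["--0-","-00-","-00-"]
    else ["-00-","-00-","-00-"]
  pvFEET.foldl (fun frames feet =>
    frames ++ [pattern_to_offsets (top ++ [feet])]) []

-- ===== PORT B =====
def pvTOP_L : List (Int × Int) := [(1,0),(2,0),(0,1),(1,1),(2,1),(1,2),(2,2)]
def pvTOP_R : List (Int × Int) := [(1,0),(2,0),(1,1),(2,1),(3,1),(1,2),(2,2)]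
def pvTOP_U : List (Int × Int) := [(2,0),(1,1),(2,1),(1,2),(2,2)]
def pvTOP_D : List (Int × Int) := [(1,0),(2,0),(1,1),(2,1),(1,2),(2,2)]
def pvFEET_OFFS : List (List (Int × Int)) := [[(0,3),(3,3)], [(1,3),(3,3)], [(0,3),(2,3)], [(0,3),(3,3)]]

def pvFRAMES : PySem.Dict String (List (List (Int × Int))) :=
  PySem.Dict.ofList
    ([("L", pvTOP_L), ("R", pvTOP_R), ("U", pvTOP_U), ("D", pvTOP_D)].map
      (fun dt => (dt.1, pvFEET_OFFS.map (fun feet => dt.2 ++ feet))))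

def make_player_frames_alt (direction : String) : List (List (Int × Int)) :=
  (PySem.Dict.getD pvFRAMES direction (PySem.Dict.getD pvFRAMES "D" [])).map
    (fun f => f)

-- ===== PRECONDITION & SPEC =====
def Spec_make_player_frames (direction : String) (out : List (List (Int × Int))) : Prop := out = make_player_frames_alt direction
instance (direction : String) (out : List (List (Int × Int))) : Decidable (Spec_make_player_frames direction out) := by unfold Spec_make_player_frames; infer_instance

-- ===== CLAIM =====
def Claim_equal_make_player_frames : Prop := ∀ (direction : String), Dom_make_player_frames direction → Spec_make_player_frames direction (make_player_frames direction)

-- ===== LEMMAS AND PROOFS =====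

-- ===== VERDICT =====
theorem make_player_frames_spec : Claim_equal_make_player_frames := by
  intro direction _
  unfold Spec_make_player_frames make_player_frames make_player_frames_alt
  by_cases h1 : direction = "L"
  · subst h1; decide
  · by_cases h2 : direction = "R"
    · subst h2; decide
    · by_cases h3 : direction = "U"
      · subst h3; decide
      · by_cases h4 : direction = "D"
        · subst h4; decide
        · simp only [h1, h2, h3, if_false]
          have hmk : pvFRAMES = PySem.Dict.mk
              (([("L", pvTOP_L), ("R", pvTOP_R), ("U", pvTOP_U), ("D", pvTOP_D)].map
                (fun dt => (dt.1, pvFEET_OFFS.map (fun feet => dt.2 ++ feet))))) := by decide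
          have hd : PySem.Dict.getD pvFRAMES direction (PySem.Dict.getD pvFRAMES "D" [])
              = PySem.Dict.getD pvFRAMES "D" [] := by
            simp [PySem.Dict.getD, PySem.Dict.get?, hmk, beq_iff_eq,
              Ne.symm h1, Ne.symm h2, Ne.symm h3, Ne.symm h4]
          rw [hd]
          decide
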